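-- pv_equiv track=rewrite | github.com/epilectrik/voynich | phases/MATERIAL_REGIME_MAPPING/scripts/folio_level_differentiation.py | get_compatible
-- ===== SOURCE A (Python) =====
-- from collections import defaultdict, Counter
--
-- def get_compatible(records, a_profiles, b_tokens):
--     compat = Counter()
--     for rid in records:
--         if rid in a_profiles:
--             p = a_profiles[rid]
--             for bt in b_tokens:
--                 if bt['middle'] in p['middles'] and bt['prefix'] in p['prefixes'] and bt['suffix'] in p['suffixes']:
--                     if bt['middle']:
--                         compat[bt['middle']] += 1
--     return compat
-- ===== SOURCE B (Python) =====
-- from collections import Counter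
--
-- def get_compatible(records, a_profiles, b_tokens):
--     # Memoize each record-id's list of compatible middles so a repeated rid
--     # never rescans b_tokens; count all hits once at the end.
--     cache = {}
--     hits = []
--     for rid in records:
--         if rid in a_profiles:
--             if rid not in cache:
--                 p = a_profiles[rid]
--                 cache[rid] = [bt['middle'] for bt in b_tokens
--                               if bt['middle'] and bt['middle'] in p['middles']
--                               and bt['prefix'] in p['prefixes']
--                               and bt['suffix'] in p['suffixes']]
--             hits.extend(cache[rid])
--     return Counter(hits)
-- ===== Notes on version B (the rewrite author's own statement) =====
-- stated objective: alternative
-- what changed: B replaces A's per-record rescan of b_tokens with a memo table keyed by record id (each profile's compatible-middle list is computed once) and builds the Counter in one pass over the collected hits instead of incrementing inside the nested loops.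
import Mathlib
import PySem

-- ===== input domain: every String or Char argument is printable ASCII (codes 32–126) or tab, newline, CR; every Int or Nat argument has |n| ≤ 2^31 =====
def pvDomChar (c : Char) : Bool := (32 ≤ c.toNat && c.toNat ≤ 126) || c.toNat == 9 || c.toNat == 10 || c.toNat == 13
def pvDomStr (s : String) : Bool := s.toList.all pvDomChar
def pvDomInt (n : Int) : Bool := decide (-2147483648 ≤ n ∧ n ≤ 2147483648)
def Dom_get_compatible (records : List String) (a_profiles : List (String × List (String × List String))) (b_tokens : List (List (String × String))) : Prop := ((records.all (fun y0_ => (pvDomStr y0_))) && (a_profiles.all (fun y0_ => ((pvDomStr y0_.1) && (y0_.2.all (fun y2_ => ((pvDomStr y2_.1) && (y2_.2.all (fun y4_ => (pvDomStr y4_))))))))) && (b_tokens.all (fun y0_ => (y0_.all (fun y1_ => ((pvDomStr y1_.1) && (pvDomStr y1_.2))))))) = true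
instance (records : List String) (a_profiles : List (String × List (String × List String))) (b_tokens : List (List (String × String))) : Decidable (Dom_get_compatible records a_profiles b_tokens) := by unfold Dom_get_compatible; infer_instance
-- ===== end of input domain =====

-- B replaces A's rescan of b_tokens for every record by a per-record-id memo table and a
-- single final Counter over the collected hits (objective: alternative; faster only when
-- record ids repeat).

-- ===== PORT A =====
-- literal transliteration of Source A: outer loop over records, inner loop over b_tokens,
-- incrementing a Counter in place (key accesses are exact under Pre_, which guarantees them).
def get_compatible (records : List String) (a_profiles : List (String × List (String × List String))) (b_tokens : List (List (String × String))) : List (String × Int) :=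
  (records.foldl (fun compat rid =>
      match (PySem.Dict.mk a_profiles).get? rid with
      | none => compat
      | some p =>
        b_tokens.foldl (fun compat bt =>
            let btd := PySem.Dict.mk bt
            let pd := PySem.Dict.mk p
            if (pd.getD "middles" []).contains (btd.getD "middle" "")
                && (pd.getD "prefixes" []).contains (btd.getD "prefix" "")
                && (pd.getD "suffixes" []).contains (btd.getD "suffix" "") then
              if btd.getD "middle" "" ≠ "" then
                compat.modify (btd.getD "middle" "") 0 (· + 1)
              else compat
            else compat) compat)
    PySem.Dict.empty).items

-- ===== PORT B =====
-- the list comprehension of Source B: the middles of the tokens of b_tokens compatible with profile p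
def pvHitlist (b_tokens : List (List (String × String))) (p : List (String × List String)) : List String :=
  b_tokens.filterMap (fun bt =>
    let btd := PySem.Dict.mk bt
    let pd := PySem.Dict.mk p
    let m := btd.getD "middle" ""
    if m ≠ "" && (pd.getD "middles" []).contains m
         && (pd.getD "prefixes" []).contains (btd.getD "prefix" "")
         && (pd.getD "suffixes" []).contains (btd.getD "suffix" "") then some m else none)

def get_compatible_alt (records : List String) (a_profiles : List (String × List (String × List String))) (b_tokens : List (List (String × String))) : List (String × Int) :=
  (PySem.Dict.counter
    (records.foldl (fun (st : PySem.Dict String (List String) × List String) rid =>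
        match (PySem.Dict.mk a_profiles).get? rid with
        | none => st
        | some p =>
          match st.1.get? rid with
          | some l => (st.1, st.2 ++ l)
          | none =>
            let l := pvHitlist b_tokens p
            (st.1.insert rid l, st.2 ++ l))
      (PySem.Dict.empty, [])).2).items

-- ===== PRECONDITION & SPEC =====
-- Pre_ admits exactly the inputs on which A raises no KeyError: for every record id found in
-- a_profiles and every token, the keys A's condition actually evaluates (left to right, with
-- Python's 'and' short-circuit) are present in the token/profile dicts.
def Pre_get_compatible (records : List String) (a_profiles : List (String × List (String × List String))) (b_tokens : List (List (String × String))) : Prop :=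
  ∀ rid ∈ records, ∀ p, (PySem.Dict.mk a_profiles).get? rid = some p →
    ∀ bt ∈ b_tokens,
      "middle" ∈ bt.map Prod.fst ∧ "middles" ∈ p.map Prod.fst ∧
      (((PySem.Dict.mk p).getD "middles" []).contains ((PySem.Dict.mk bt).getD "middle" "") = true →
        "prefix" ∈ bt.map Prod.fst ∧ "prefixes" ∈ p.map Prod.fst ∧
        (((PySem.Dict.mk p).getD "prefixes" []).contains ((PySem.Dict.mk bt).getD "prefix" "") = true →
          "suffix" ∈ bt.map Prod.fst ∧ "suffixes" ∈ p.map Prod.fst))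
instance (records : List String) (a_profiles : List (String × List (String × List String))) (b_tokens : List (List (String × String))) : Decidable (Pre_get_compatible records a_profiles b_tokens) := by unfold Pre_get_compatible; infer_instance

def pvWitness_get_compatible : List String × (List (String × List (String × List String))) × (List (List (String × String))) :=
  (["r"], [("r", [("middles", ["m"]), ("prefixes", ["p"]), ("suffixes", ["s"])])],
   [[("middle", "m"), ("prefix", "p"), ("suffix", "s")]])

def Spec_get_compatible (records : List String) (a_profiles : List (String × List (String × List String))) (b_tokens : List (List (String × String))) (out : List (String × Int)) : Prop := out = get_compatible_alt records a_profiles b_tokens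
instance (records : List String) (a_profiles : List (String × List (String × List String))) (b_tokens : List (List (String × String))) (out : List (String × Int)) : Decidable (Spec_get_compatible records a_profiles b_tokens out) := by unfold Spec_get_compatible; infer_instance

-- ===== CLAIM (what is proved, stated in full; the proofs are below) =====
def Claim_equal_get_compatible : Prop := ∀ (records : List String) (a_profiles : List (String × List (String × List String))) (b_tokens : List (List (String × String))), Dom_get_compatible records a_profiles b_tokens → Pre_get_compatible records a_profiles b_tokens → Spec_get_compatible records a_profiles b_tokens (get_compatible records a_profiles b_tokens)

-- ===== LEMMAS AND PROOFS =====

-- the contribution of one record id (what B caches for rid)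
def pvChunk (a_profiles : List (String × List (String × List String))) (b_tokens : List (List (String × String))) (rid : String) : List String :=
  match (PySem.Dict.mk a_profiles).get? rid with
  | some p => pvHitlist b_tokens p
  | none => []

-- A's inner token loop performs exactly one increment per element of pvHitlist, in order
theorem pv_inner_eq (b_tokens : List (List (String × String))) (p : List (String × List String)) (c : PySem.Dict String Int) :
    b_tokens.foldl (fun compat bt =>
        let btd := PySem.Dict.mk bt
        let pd := PySem.Dict.mk p
        if (pd.getD "middles" []).contains (btd.getD "middle" "")
            && (pd.getD "prefixes" []).contains (btd.getD "prefix" "")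
            && (pd.getD "suffixes" []).contains (btd.getD "suffix" "") then
          if btd.getD "middle" "" ≠ "" then
            compat.modify (btd.getD "middle" "") 0 (· + 1)
          else compat
        else compat) c
      = (pvHitlist b_tokens p).foldl (fun d x => d.modify x 0 (· + 1)) c := by
  induction b_tokens generalizing c with
  | nil => rfl
  | cons bt rest ih =>
    simp only [List.foldl_cons]
    by_cases hm : (PySem.Dict.mk bt).getD "middle" "" = "" <;>
    by_cases h1 : (PySem.Dict.mk bt).getD "middle" "" ∈ (PySem.Dict.mk p).getD "middles" [] <;>
    by_cases h2 : (PySem.Dict.mk bt).getD "prefix" "" ∈ (PySem.Dict.mk p).getD "prefixes" [] <;>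
    by_cases h3 : (PySem.Dict.mk bt).getD "suffix" "" ∈ (PySem.Dict.mk p).getD "suffixes" [] <;>
      (try simp [pvHitlist] at ih) <;>
      (try simp [pvHitlist, hm, h1, h2, h3]) <;>
      exact ih _

-- A's outer loop equals a fold of increments over the concatenated per-record chunks
theorem pvA_fold (a_profiles : List (String × List (String × List String))) (b_tokens : List (List (String × String))) (records : List String) (c : PySem.Dict String Int) :
    records.foldl (fun compat rid =>
      match (PySem.Dict.mk a_profiles).get? rid with
      | none => compat
      | some p =>
        b_tokens.foldl (fun compat bt =>
            let btd := PySem.Dict.mk bt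
            let pd := PySem.Dict.mk p
            if (pd.getD "middles" []).contains (btd.getD "middle" "")
                && (pd.getD "prefixes" []).contains (btd.getD "prefix" "")
                && (pd.getD "suffixes" []).contains (btd.getD "suffix" "") then
              if btd.getD "middle" "" ≠ "" then
                compat.modify (btd.getD "middle" "") 0 (· + 1)
              else compat
            else compat) compat) c
    = (records.flatMap (pvChunk a_profiles b_tokens)).foldl (fun d x => d.modify x 0 (· + 1)) c := by
  induction records generalizing c with
  | nil => rfl
  | cons r rest ih =>
    simp only [List.foldl_cons, List.flatMap_cons, List.foldl_append]
    cases hr : (PySem.Dict.mk a_profiles).get? r with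
    | none => simp only [pvChunk, hr]; exact ih c
    | some p =>
      simp only [pvChunk, hr]
      rw [pv_inner_eq]
      exact ih _

theorem pvA_eq (records : List String) (a_profiles : List (String × List (String × List String))) (b_tokens : List (List (String × String))) :
    get_compatible records a_profiles b_tokens
      = (PySem.Dict.counter (records.flatMap (pvChunk a_profiles b_tokens))).items := by
  unfold get_compatible
  rw [pvA_fold, PySem.Dict.counter_eq_foldl]

-- B's cache invariant: every cached list is that record id's chunk; hence B's hits list
-- is exactly the concatenated chunks
theorem pvB_fold (a_profiles : List (String × List (String × List String))) (b_tokens : List (List (String × String))) (records : List String) (cache : PySem.Dict String (List String)) (hits : List String)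
    (hc : ∀ rid l, cache.get? rid = some l → l = pvChunk a_profiles b_tokens rid) :
    (records.foldl (fun (st : PySem.Dict String (List String) × List String) rid =>
        match (PySem.Dict.mk a_profiles).get? rid with
        | none => st
        | some p =>
          match st.1.get? rid with
          | some l => (st.1, st.2 ++ l)
          | none =>
            let l := pvHitlist b_tokens p
            (st.1.insert rid l, st.2 ++ l)) (cache, hits)).2
      = hits ++ records.flatMap (pvChunk a_profiles b_tokens) := by
  induction records generalizing cache hits with
  | nil => simp
  | cons r rest ih =>
    simp only [List.foldl_cons, List.flatMap_cons]
    cases hr : (PySem.Dict.mk a_profiles).get? r with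
    | none => simp only [pvChunk, hr]; rw [ih cache hits hc]; simp
    | some p =>
      cases hcr : cache.get? r with
      | some l =>
        simp only []
        rw [ih cache (hits ++ l) hc]
        have : l = pvChunk a_profiles b_tokens r := hc r l hcr
        simp [this, List.append_assoc]
      | none =>
        simp only []
        rw [ih (cache.insert r (pvHitlist b_tokens p)) (hits ++ pvHitlist b_tokens p) ?_]
        · have : pvChunk a_profiles b_tokens r = pvHitlist b_tokens p := by
            simp [pvChunk, hr]
          simp [this, List.append_assoc]
        · intro rid l hget
          rw [PySem.Dict.get?_insert] at hget
          by_cases hrid : rid = r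
          · simp [hrid] at hget
            simp [← hget, pvChunk, hrid, hr]
          · simp [hrid] at hget
            exact hc rid l hget

theorem pvB_hits (records : List String) (a_profiles : List (String × List (String × List String))) (b_tokens : List (List (String × String))) :
    get_compatible_alt records a_profiles b_tokens
      = (PySem.Dict.counter (records.flatMap (pvChunk a_profiles b_tokens))).items := by
  unfold get_compatible_alt
  rw [pvB_fold a_profiles b_tokens records PySem.Dict.empty []
      (by intro rid l h; simp [PySem.Dict.get?_empty] at h)]
  simp

-- ===== VERDICT (by name: the statement is the Claim_ definition above) =====
theorem get_compatible_spec : Claim_equal_get_compatible := by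
  intro records a_profiles b_tokens _ _
  unfold Spec_get_compatible
  rw [pvA_eq, pvB_hits]
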